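-- pv_equiv track=rewrite | github.com/gunnihinn/advent-2018 | py/day06.py | claim
-- ===== SOURCE A (Python) =====
-- import collections
--
-- def corners(points):
--     minX = min(( x for (x,y) in points))
--     maxX = max(( x for (x,y) in points))
--     minY = min(( y for (x,y) in points))
--     maxY = max(( y for (x,y) in points))
--
--     return (minX, maxX, minY, maxY)
--
-- def box_points(minX, maxX, minY, maxY):
--     return [ (x,y) for x in range(minX, maxX) for y in range(minY, maxY) ]
--
-- def manhattan(x, y):
--     return abs(x[0]-y[0]) + abs(x[1]-y[1])
--
-- def claim(points):
--     pt_to_area = collections.defaultdict(int)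
--
--     box = box_points(*corners(points))
--
--     for p in box:
--         distance = collections.defaultdict(list)
--         for q in points:
--             distance[manhattan(p, q)].append(q)
--
--         m = min(distance.keys())
--         if len(distance[m]) == 1:
--             q = distance[m][0]
--             pt_to_area[q] += 1
--
--     return pt_to_area
-- ===== SOURCE B (Python) =====
-- def claim(points):
--     minX = min(x for (x, y) in points)
--     maxX = max(x for (x, y) in points)
--     minY = min(y for (x, y) in points)
--     maxY = max(y for (x, y) in points)
--
--     areas = {}
--     for x in range(minX, maxX):
--         for y in range(minY, maxY):
--             best = None
--             bestq = None
--             unique = True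
--             for q in points:
--                 d = abs(x - q[0]) + abs(y - q[1])
--                 if best is None or d < best:
--                     best, bestq, unique = d, q, True
--                 elif d == best:
--                     unique = False
--             if unique and bestq is not None:
--                 areas[bestq] = areas.get(bestq, 0) + 1
--     return areas
-- ===== Notes on version B (the rewrite author's own statement) =====
-- stated objective: faster
-- what changed: Per grid cell, A builds a defaultdict mapping each distance to the list of points at that distance, then takes the min key and tests that its bucket is a singleton; B replaces that whole per-cell dict with a single pass over the points tracking (best distance, first best point, uniqueness flag), and uses a plain dict get/set for the areas.
import Mathlib
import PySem

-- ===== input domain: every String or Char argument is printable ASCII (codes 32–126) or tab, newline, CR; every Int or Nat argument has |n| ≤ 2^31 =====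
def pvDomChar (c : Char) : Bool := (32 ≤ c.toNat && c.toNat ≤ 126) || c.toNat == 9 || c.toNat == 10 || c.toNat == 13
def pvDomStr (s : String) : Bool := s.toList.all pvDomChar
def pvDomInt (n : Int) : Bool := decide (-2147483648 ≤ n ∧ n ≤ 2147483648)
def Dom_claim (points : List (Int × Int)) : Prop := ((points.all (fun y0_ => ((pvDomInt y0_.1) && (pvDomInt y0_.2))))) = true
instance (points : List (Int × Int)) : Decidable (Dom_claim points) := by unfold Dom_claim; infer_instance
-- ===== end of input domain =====

-- B replaces A's per-cell defaultdict of distance buckets (built, then min over keys, then a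
-- singleton test) by a single pass over the points per cell that tracks (best distance, first
-- best point, uniqueness flag); measurably faster by a constant factor, same return value.

-- ===== PORT A =====
def manhattanA (x y : Int × Int) : Int := |x.1 - y.1| + |x.2 - y.2|

-- corners(points): min/max of the coordinates; `none` where Python's min/max raise (empty list)
def cornersA (points : List (Int × Int)) : Option (Int × Int × Int × Int) :=
  match PySem.List.min? (points.map (·.1)) id, PySem.List.max? (points.map (·.1)) id,
        PySem.List.min? (points.map (·.2)) id, PySem.List.max? (points.map (·.2)) id with
  | some minX, some maxX, some minY, some maxY => some (minX, maxX, minY, maxY)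
  | _, _, _, _ => none

def boxPointsA (minX maxX minY maxY : Int) : List (Int × Int) :=
  (PySem.List.pyRange minX maxX 1).flatMap (fun x =>
    (PySem.List.pyRange minY maxY 1).map (fun y => (x, y)))

-- one iteration of A's `for p in box` loop
def claimStepA (points : List (Int × Int)) (acc : PySem.Dict (Int × Int) Int)
    (p : Int × Int) : PySem.Dict (Int × Int) Int :=
  let distD : PySem.Dict Int (List (Int × Int)) :=
    points.foldl (fun dd q => dd.modify (manhattanA p q) [] (· ++ [q])) PySem.Dict.empty
  match PySem.List.min? distD.keys id with
  | none => acc                                   -- unreachable when points ≠ []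
  | some m =>
    let l := distD.getD m []
    if l.length = 1 then
      match PySem.List.pyGet? l 0 with
      | some q => acc.modify q 0 (· + 1)
      | none => acc
    else acc

def claim (points : List (Int × Int)) : List (Int × Int × Int) :=
  match cornersA points with
  | none => []                                    -- Python raises here; excluded by Pre_claim
  | some (minX, maxX, minY, maxY) =>
    let box := boxPointsA minX maxX minY maxY
    (box.foldl (claimStepA points) PySem.Dict.empty).items.map (fun pq => (pq.1.1, pq.1.2, pq.2))

-- ===== PORT B =====
-- one inner scan of Source B: state = None | (best, bestq, unique)
def scanB (x y : Int) (points : List (Int × Int)) : Option (Int × (Int × Int) × Bool) :=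
  points.foldl (fun st q =>
    let d := |x - q.1| + |y - q.2|
    match st with
    | none => some (d, q, true)
    | some (b, bq, u) =>
      if d < b then some (d, q, true)
      else if d == b then some (b, bq, false)
      else some (b, bq, u)) none

def claim_alt (points : List (Int × Int)) : List (Int × Int × Int) :=
  match PySem.List.min? (points.map (·.1)) id, PySem.List.max? (points.map (·.1)) id,
        PySem.List.min? (points.map (·.2)) id, PySem.List.max? (points.map (·.2)) id with
  | some minX, some maxX, some minY, some maxY =>
    ((PySem.List.pyRange minX maxX 1).foldl (fun areas x =>
      (PySem.List.pyRange minY maxY 1).foldl (fun areas y =>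
        match scanB x y points with
        | some (_, bq, true) => areas.insert bq (areas.getD bq 0 + 1)
        | _ => areas) areas) (PySem.Dict.empty : PySem.Dict (Int × Int) Int)).items.map
      (fun pq => (pq.1.1, pq.1.2, pq.2))
  | _, _, _, _ => []                              -- Python raises here; excluded by Pre_claim

-- ===== PRECONDITION & SPEC =====
-- Pre_ excludes only the empty list, on which A's min() raises ValueError.
def Pre_claim (points : List (Int × Int)) : Prop := points ≠ []
instance (points : List (Int × Int)) : Decidable (Pre_claim points) := by unfold Pre_claim; infer_instance

def pvWitness_claim : (List (Int × Int)) := [(0, 0), (2, 3)]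

def Spec_claim (points : List (Int × Int)) (out : List (Int × Int × Int)) : Prop := out = claim_alt points
instance (points : List (Int × Int)) (out : List (Int × Int × Int)) : Decidable (Spec_claim points out) := by unfold Spec_claim; infer_instance

-- ===== CLAIM (what is proved, stated in full; the proofs are below) =====
def Claim_equal_claim : Prop := ∀ (points : List (Int × Int)), Dom_claim points → Pre_claim points → Spec_claim points (claim points)

-- ===== LEMMAS AND PROOFS =====

-- characterization of B's inner scan: it returns the minimum distance m, the first point w
-- attaining it, and whether w attains it uniquely
theorem scanB_char (x y : Int) (points : List (Int × Int)) (h : points ≠ []) :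
    ∃ m w t rest,
      scanB x y points = some (m, w, t) ∧
      (∀ q ∈ points, m ≤ manhattanA (x, y) q) ∧
      points.filter (fun q => manhattanA (x, y) q == m) = w :: rest ∧
      (t = true ↔ rest = []) := by
  induction points using List.reverseRecOn with
  | nil => exact absurd rfl h
  | append_singleton l z ih =>
    rcases eq_or_ne l [] with rfl | hl
    · refine ⟨|x - z.1| + |y - z.2|, z, true, [], by simp [scanB], ?_, ?_, by simp⟩
      · intro q hq
        simp only [List.nil_append, List.mem_singleton] at hq
        subst hq; exact le_refl _
      · simp [manhattanA]
    · obtain ⟨m, w, t, rest, hscan, hmin, hfilt, ht⟩ := ih hl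
      have hstep : scanB x y (l ++ [z]) =
          (if |x - z.1| + |y - z.2| < m then some (|x - z.1| + |y - z.2|, z, true)
           else if |x - z.1| + |y - z.2| == m then some (m, w, false)
           else some (m, w, t)) := by
        unfold scanB at hscan ⊢
        rw [List.foldl_append, hscan]
        simp only [List.foldl_cons, List.foldl_nil]
      have hman : manhattanA (x, y) z = |x - z.1| + |y - z.2| := rfl
      by_cases h1 : |x - z.1| + |y - z.2| < m
      · refine ⟨|x - z.1| + |y - z.2|, z, true, [], by rw [hstep]; simp [h1], ?_, ?_, by simp⟩
        · intro q hq
          rcases List.mem_append.mp hq with hq | hq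
          · exact le_of_lt (lt_of_lt_of_le h1 (hmin q hq))
          · simp only [List.mem_singleton] at hq; subst hq; exact le_refl _
        · rw [List.filter_append]
          have hnil : l.filter (fun q => manhattanA (x, y) q == |x - z.1| + |y - z.2|) = [] := by
            refine List.filter_eq_nil_iff.mpr (fun q hq => ?_)
            have := lt_of_lt_of_le h1 (hmin q hq)
            simp only [beq_iff_eq]
            omega
          rw [hnil]
          simp [hman]
      · by_cases h2 : |x - z.1| + |y - z.2| = m
        · refine ⟨m, w, false, rest ++ [z], by rw [hstep]; simp [h2], ?_, ?_, by simp⟩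
          · intro q hq
            rcases List.mem_append.mp hq with hq | hq
            · exact hmin q hq
            · simp only [List.mem_singleton] at hq; subst hq; omega
          · rw [List.filter_append, hfilt]
            simp [hman, h2]
        · refine ⟨m, w, t, rest, ?_, ?_, ?_, ht⟩
          · rw [hstep]
            simp only [if_neg h1, beq_iff_eq, if_neg h2]
          · intro q hq
            rcases List.mem_append.mp hq with hq | hq
            · exact hmin q hq
            · simp only [List.mem_singleton] at hq; subst hq; omega
          · rw [List.filter_append, hfilt]
            simp [hman, h2]

-- A's per-cell bucket dict: its m is the same minimum, its bucket the same filter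
theorem step_eq (points : List (Int × Int)) (h : points ≠ []) (x y : Int)
    (acc : PySem.Dict (Int × Int) Int) :
    claimStepA points acc (x, y) =
      (match scanB x y points with
       | some (_, bq, true) => acc.insert bq (acc.getD bq 0 + 1)
       | _ => acc) := by
  obtain ⟨m, w, t, rest, hscan, hmin, hfilt, ht⟩ := scanB_char x y points h
  have hw_mem : w ∈ points :=
    List.mem_of_mem_filter (hfilt ▸ List.mem_cons_self)
  have hw_key : manhattanA (x, y) w = m := by
    have := List.of_mem_filter (p := fun q => manhattanA (x, y) q == m)
      (hfilt ▸ List.mem_cons_self)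
    simpa using this
  simp only [claimStepA]
  -- the bucket dict as a fold over key/value pairs
  have hpairs : points.foldl (fun dd q => dd.modify (manhattanA (x, y) q) [] (· ++ [q]))
        (PySem.Dict.empty : PySem.Dict Int (List (Int × Int))) =
      (points.map (fun q => (manhattanA (x, y) q, q))).foldl
        (fun dd pr => dd.modify pr.1 [] (· ++ [pr.2])) PySem.Dict.empty := by
    rw [List.foldl_map]
  -- its keys are the distinct distances
  have hkeys : (points.foldl (fun dd q => dd.modify (manhattanA (x, y) q) [] (· ++ [q]))
        (PySem.Dict.empty : PySem.Dict Int (List (Int × Int)))).keys =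
      PySem.Set.ofList (points.map (manhattanA (x, y))) := by
    rw [PySem.Dict.keys_foldl_modify_key points (manhattanA (x, y)) []
      (fun _ q => (· ++ [q])) PySem.Dict.empty]
    exact PySem.Set.update_nil_left _
  -- min over the distinct distances is m
  have hminkey : PySem.List.min? (PySem.Set.ofList (points.map (manhattanA (x, y)))) id = some m := by
    cases hmm : PySem.List.min? (PySem.Set.ofList (points.map (manhattanA (x, y)))) id with
    | none =>
      have hnil := (PySem.List.min?_eq_none_iff _ _).mp hmm
      have : manhattanA (x, y) w ∈ PySem.Set.ofList (points.map (manhattanA (x, y))) :=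
        (PySem.Set.mem_ofList _ _).mpr (List.mem_map_of_mem hw_mem)
      rw [hnil] at this
      exact absurd this (List.not_mem_nil)
    | some m0 =>
      have hm0mem : m0 ∈ points.map (manhattanA (x, y)) :=
        (PySem.Set.mem_ofList _ _).mp (PySem.List.min?_mem hmm)
      obtain ⟨q, hq, hqm⟩ := List.mem_map.mp hm0mem
      have h1 : m ≤ m0 := hqm ▸ hmin q hq
      have h2 : m0 ≤ m := by
        have := PySem.List.min?_isMin hmm (manhattanA (x, y) w)
          ((PySem.Set.mem_ofList _ _).mpr (List.mem_map_of_mem hw_mem))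
        simpa [hw_key] using this
      rw [le_antisymm h2 h1]
  -- the bucket at m is the filter
  have hbucket : (points.foldl (fun dd q => dd.modify (manhattanA (x, y) q) [] (· ++ [q]))
        (PySem.Dict.empty : PySem.Dict Int (List (Int × Int)))).getD m [] =
      points.filter (fun q => manhattanA (x, y) q == m) := by
    rw [hpairs, PySem.Dict.getD_foldl_modify_append]
    rw [List.filter_map, List.map_map]
    simp [Function.comp_def]
  rw [hscan, hkeys, hminkey]
  simp only [hbucket, hfilt]
  cases rest with
  | nil =>
    have htt : t = true := ht.mpr rfl
    subst htt
    simp [PySem.List.pyGet?, PySem.List.pyIdx?, PySem.Dict.modify]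
  | cons r rs =>
    have htf : t = false := by
      cases t with
      | true => exact absurd (ht.mp rfl) (by simp)
      | false => rfl
    subst htf
    simp

-- ===== VERDICT (by name: the statement is the Claim_ definition above) =====
theorem claim_spec : Claim_equal_claim := by
  intro points _dom hpre
  unfold Pre_claim at hpre
  have hfun : ∀ (acc : PySem.Dict (Int × Int) Int) (p : Int × Int),
      claimStepA points acc p =
        (match scanB p.1 p.2 points with
         | some (_, bq, true) => acc.insert bq (acc.getD bq 0 + 1)
         | _ => acc) := by
    intro acc p
    rcases p with ⟨x, y⟩
    exact step_eq points hpre x y acc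
  unfold Spec_claim claim claim_alt cornersA boxPointsA
  cases hmx : PySem.List.min? (points.map (·.1)) id with
  | none => exact absurd ((PySem.List.min?_eq_none_iff _ _).mp hmx) (by simp [hpre])
  | some minX =>
  cases hMx : PySem.List.max? (points.map (·.1)) id with
  | none => exact absurd ((PySem.List.max?_eq_none_iff _ _).mp hMx) (by simp [hpre])
  | some maxX =>
  cases hmy : PySem.List.min? (points.map (·.2)) id with
  | none => exact absurd ((PySem.List.min?_eq_none_iff _ _).mp hmy) (by simp [hpre])
  | some minY =>
  cases hMy : PySem.List.max? (points.map (·.2)) id with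
  | none => exact absurd ((PySem.List.max?_eq_none_iff _ _).mp hMy) (by simp [hpre])
  | some maxY =>
  simp only [List.foldl_flatMap, List.foldl_map]
  simp only [hfun]
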